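-- pv_equiv track=rewrite | github.com/pragdave/cs3342_09 | grammar.py | isValidSentence
-- ===== SOURCE A (Python) =====
-- states = [
--           [0, "the", 1],
--           [1, "lazy", 2],
--           [1, "smelly", 2],
--           [1, "dog", 3],
--           [1, "cat", 3],
--           [2, "lazy", 2],
--           [2, "smelly", 2],
--           [2, "cat", 3],
--           [2, "dog", 3],
--           [3, "ran", 4],
--           [3, "ate", 4],
--           [4, "slowly", 5],
--           [4, "noisily", 5],
--           [4, "", -1],
--           [5, "", -1]
--          ]
--
-- def isValidSentence(string_to_parse):
--     #sets the current state to the starting state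
--     curr_state = 0
--     data = string_to_parse.split()
--     #I append an empty string so that the function will know what a valid
--     #sentence end is vs. a premature end. I like this better than putting EOI
--     #at the end of the sentences, which looks weird
--     data.append("")
--     for word in data:
--         found = False
--         #I wanted to try a find function of some sort to make this not so
--         #brute-force-ish, but my python knowledge is meh and I didn't know how
--         #find functions would work with my list of lists used for states
--         for state in states:
--             if state[0] == curr_state and state[1] == word:
--                 curr_state = state[2]
--                 found = True
--                 break
--         if not found:
--             return False
--     if curr_state == -1:
--         return True
--     else:
--         return False
-- ===== SOURCE B (Python) =====
-- def _noun_phrase_tail(ws):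
--     # noun, verb, optional adverb, then end of input
--     if not ws or ws[0] not in ("dog", "cat"):
--         return False
--     ws = ws[1:]
--     if not ws or ws[0] not in ("ran", "ate"):
--         return False
--     ws = ws[1:]
--     if not ws:
--         return True
--     return ws[0] in ("slowly", "noisily") and not ws[1:]
--
-- def _drop_adjectives(ws):
--     while ws and ws[0] in ("lazy", "smelly"):
--         ws = ws[1:]
--     return ws
--
-- def isValidSentence(string_to_parse):
--     ws = string_to_parse.split()
--     if not ws or ws[0] != "the":
--         return False
--     return _noun_phrase_tail(_drop_adjectives(ws[1:]))
-- ===== Notes on version B (the rewrite author's own statement) =====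
-- stated objective: simpler
-- what changed: Replaced the DFA transition-table scan (inner linear search over a 15-row state list per word, plus an appended end-of-input sentinel) by a direct recursive-descent parse of the fixed grammar: article, zero-or-more adjectives, noun, verb, optional adverb, end of input.
import Mathlib
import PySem

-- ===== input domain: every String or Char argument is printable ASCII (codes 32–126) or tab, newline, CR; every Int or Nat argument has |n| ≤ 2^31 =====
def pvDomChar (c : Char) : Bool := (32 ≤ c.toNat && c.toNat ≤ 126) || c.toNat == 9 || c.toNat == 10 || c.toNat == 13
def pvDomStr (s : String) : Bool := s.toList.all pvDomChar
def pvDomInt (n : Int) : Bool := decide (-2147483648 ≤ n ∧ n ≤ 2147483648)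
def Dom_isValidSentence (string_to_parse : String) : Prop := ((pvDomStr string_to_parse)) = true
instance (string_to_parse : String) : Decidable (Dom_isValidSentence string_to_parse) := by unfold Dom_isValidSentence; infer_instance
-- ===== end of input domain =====

-- B replaces A's DFA transition-table scan by a direct recursive-descent parse of the fixed grammar (simpler).


-- ===== PORT A =====
-- the module-level 'states' transition table
def pvStates : List (Int × String × Int) :=
  [(0, "the", 1), (1, "lazy", 2), (1, "smelly", 2), (1, "dog", 3), (1, "cat", 3),
   (2, "lazy", 2), (2, "smelly", 2), (2, "cat", 3), (2, "dog", 3),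
   (3, "ran", 4), (3, "ate", 4), (4, "slowly", 5), (4, "noisily", 5),
   (4, "", -1), (5, "", -1)]

-- inner 'for state in states: … break' search
def pvFind (cs : Int) (w : String) : List (Int × String × Int) → Option Int
  | [] => none
  | (a, b, c) :: rest => if a = cs ∧ b = w then some c else pvFind cs w rest

-- outer 'for word in data' loop with early 'return False', then the final curr_state check
def pvRunA (cs : Int) : List String → Bool
  | [] => cs == -1
  | w :: ws =>
    match pvFind cs w pvStates with
    | some ns => pvRunA ns ws
    | none => false

def isValidSentence (string_to_parse : String) : Bool :=
  pvRunA 0 (PySem.Str.split₀ string_to_parse ++ [""])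

-- ===== PORT B =====
-- _drop_adjectives
def pvDropAdj : List String → List String
  | [] => []
  | w :: ws => if w = "lazy" || w = "smelly" then pvDropAdj ws else w :: ws

-- the adverb-or-end tail of _noun_phrase_tail
def pvAdv : List String → Bool
  | [] => true
  | a :: ws => (a = "slowly" || a = "noisily") && ws.isEmpty

-- the verb part of _noun_phrase_tail
def pvVerb : List String → Bool
  | [] => false
  | v :: ws => if v = "ran" || v = "ate" then pvAdv ws else false

-- _noun_phrase_tail
def pvNoun : List String → Bool
  | [] => false
  | n :: ws => if n = "dog" || n = "cat" then pvVerb ws else false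

def isValidSentence_alt (string_to_parse : String) : Bool :=
  match PySem.Str.split₀ string_to_parse with
  | [] => false
  | w :: ws => if w = "the" then pvNoun (pvDropAdj ws) else false

-- ===== PRECONDITION & SPEC =====
def Spec_isValidSentence (string_to_parse : String) (out : Bool) : Prop := out = isValidSentence_alt string_to_parse
instance (string_to_parse : String) (out : Bool) : Decidable (Spec_isValidSentence string_to_parse out) := by unfold Spec_isValidSentence; infer_instance

-- ===== CLAIM (what is proved, stated in full; the proofs are below) =====
def Claim_equal_isValidSentence : Prop := ∀ (string_to_parse : String), Dom_isValidSentence string_to_parse → Spec_isValidSentence string_to_parse (isValidSentence string_to_parse)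

-- ===== LEMMAS AND PROOFS =====

-- state 4: optional adverb, then EOI
theorem runA4_eq_adv (ws : List String) : pvRunA 4 (ws ++ [""]) = pvAdv ws := by
  cases ws with
  | nil => decide
  | cons a ws =>
    by_cases ha : a = "slowly" ∨ a = "noisily"
    · rcases ha with h | h <;> subst h <;>
        cases ws with
        | nil => decide
        | cons x ws =>
          by_cases hx : x = ""
          · subst hx
            simp [pvRunA, pvFind, pvStates, pvAdv, List.isEmpty]
            cases ws <;> simp [pvRunA, pvFind, pvStates]
          · simp [pvRunA, pvFind, pvStates, pvAdv, Ne.symm hx, List.isEmpty]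
    · push Not at ha
      obtain ⟨h1, h2⟩ := ha
      by_cases he : a = ""
      · subst he
        simp [pvRunA, pvFind, pvStates, pvAdv]
        cases ws <;> simp [pvRunA, pvFind, pvStates]
      · simp [pvRunA, pvFind, pvStates, pvAdv, Ne.symm h1, Ne.symm h2, Ne.symm he, h1, h2]

-- state 3: verb
theorem runA3_eq_verb (ws : List String) : pvRunA 3 (ws ++ [""]) = pvVerb ws := by
  cases ws with
  | nil => decide
  | cons v ws =>
    by_cases hv : v = "ran" ∨ v = "ate"
    · rcases hv with h | h <;> subst h <;>
        simp [pvRunA, pvFind, pvStates, pvVerb, runA4_eq_adv]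
    · push Not at hv
      obtain ⟨h1, h2⟩ := hv
      simp [pvRunA, pvFind, pvStates, pvVerb, Ne.symm h1, Ne.symm h2, h1, h2]

-- states 1 and 2: adjectives then noun
theorem runA12_eq_noun (ws : List String) :
    pvRunA 1 (ws ++ [""]) = pvNoun (pvDropAdj ws) ∧
    pvRunA 2 (ws ++ [""]) = pvNoun (pvDropAdj ws) := by
  induction ws with
  | nil => decide
  | cons w ws ih =>
    by_cases ha : w = "lazy" ∨ w = "smelly"
    · rcases ha with h | h <;> subst h <;>
        simp [pvRunA, pvFind, pvStates, pvDropAdj, ih.2]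
    · push Not at ha
      obtain ⟨h1, h2⟩ := ha
      by_cases hn : w = "dog" ∨ w = "cat"
      · rcases hn with h | h <;> subst h <;>
          simp [pvRunA, pvFind, pvStates, pvDropAdj, pvNoun, runA3_eq_verb]
      · push Not at hn
        obtain ⟨h3, h4⟩ := hn
        simp [pvRunA, pvFind, pvStates, pvDropAdj, pvNoun,
          Ne.symm h1, Ne.symm h2, Ne.symm h3, Ne.symm h4, h1, h2, h3, h4]

-- state 0: the article, on an arbitrary word list
theorem runA_eq_parse (ws : List String) :
    pvRunA 0 (ws ++ [""]) =
      (match ws with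
       | [] => false
       | w :: ws => if w = "the" then pvNoun (pvDropAdj ws) else false) := by
  cases ws with
  | nil => decide
  | cons w ws =>
    by_cases hw : w = "the"
    · subst hw
      simp [pvRunA, pvFind, pvStates, (runA12_eq_noun ws).1]
    · simp [pvRunA, pvFind, pvStates, Ne.symm hw, hw]

-- ===== VERDICT (by name: the statement is the Claim_ definition above) =====
theorem isValidSentence_spec : Claim_equal_isValidSentence := by
  intro s _
  unfold Spec_isValidSentence isValidSentence isValidSentence_alt
  exact runA_eq_parse (PySem.Str.split₀ s)
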